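-- pv_equiv track=rewrite | github.com/kevinkim-dev/self_study | Baekjoon/self_study/silver_1/21314.py | min_mks
-- ===== SOURCE A (Python) =====
-- def min_mks(N):
--     num = ''
--     m = 0
--     for i in range(len(N)):
--         if N[i] == 'K':
--             num += '1'*int(bool(m)) +'0'*(m-1) + '5'
--             m = 0
--         else:
--             m += 1
--     if m:
--         num += '1'+'0'*(m-1)
--     return int(num)
-- ===== SOURCE B (Python) =====
-- def min_mks(N):
--     parts = N.split('K')
--     body = ''.join(('1' + '0' * (len(p) - 1) if p else '') + '5' for p in parts[:-1])
--     tail = '1' + '0' * (len(parts[-1]) - 1) if parts[-1] else ''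
--     return int(body + tail)
-- ===== Notes on version B (the rewrite author's own statement) =====
-- stated objective: simpler
-- what changed: B replaces A's index loop with a mutable run counter and incremental string concatenation by splitting N on 'K' and mapping each M-run directly to its digit block (join of blocks, then one int()).
import Mathlib
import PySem

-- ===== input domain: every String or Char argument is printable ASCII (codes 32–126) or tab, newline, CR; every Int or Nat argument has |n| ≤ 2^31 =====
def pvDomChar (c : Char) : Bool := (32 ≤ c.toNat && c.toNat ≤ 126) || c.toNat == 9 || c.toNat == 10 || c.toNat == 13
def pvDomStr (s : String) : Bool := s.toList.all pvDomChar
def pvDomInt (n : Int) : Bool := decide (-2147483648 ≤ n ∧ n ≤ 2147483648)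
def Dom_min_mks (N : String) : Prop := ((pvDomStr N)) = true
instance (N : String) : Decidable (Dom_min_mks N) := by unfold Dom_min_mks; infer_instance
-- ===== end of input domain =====

-- B re-derives the answer from N.split('K'): each M-run between K's becomes its digit block
-- directly (objective: simpler decomposition — split + join instead of a char loop with a run counter).


-- ===== PORT A =====
-- one iteration of A's loop body, applied to the char N[i]
def minMksStepA (s : List Char × Int) (c : Char) : List Char × Int :=
  if c == 'K' then
    (s.1 ++ PySem.List.pyRepeat ['1'] (if s.2 = 0 then 0 else 1)
         ++ PySem.List.pyRepeat ['0'] (s.2 - 1) ++ ['5'], 0)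
  else (s.1, s.2 + 1)

-- the trailing "if m: num += '1'+'0'*(m-1)" of A
def minMksFin (s : List Char × Int) : List Char :=
  if s.2 = 0 then s.1 else s.1 ++ ['1'] ++ PySem.List.pyRepeat ['0'] (s.2 - 1)

-- int(num) is none exactly when num = '' (i.e. N = ''), excluded by Pre_; .getD 0 only totalises
def min_mks (N : String) : Int :=
  let num := minMksFin ((PySem.List.pyRange 0 (PySem.Str.len N)).foldl
    (fun s i => minMksStepA s (PySem.List.pyGetD N.toList i ' ')) ([], 0))
  (PySem.Int.ofChars? num).getD 0

-- ===== PORT B =====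
-- '1' + '0'*(len(p)-1) if p else ''
def minMksRun (p : List Char) : List Char :=
  if p.isEmpty then [] else '1' :: List.replicate (p.length - 1) '0'

-- int(body + tail) is none exactly when N = '' (excluded by Pre_); .getD 0 only totalises
def min_mks_alt (N : String) : Int :=
  let parts := N.toList.splitOn 'K'
  let body := (parts.dropLast.map (fun p => minMksRun p ++ ['5'])).flatten
  let tail := minMksRun (PySem.List.pyGetD parts (-1) [])
  (PySem.Int.ofChars? (body ++ tail)).getD 0

-- ===== PRECONDITION & SPEC =====
-- Pre_ excludes only N = "": there A's num stays '' and int('') raises ValueError (B raises too)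
def Pre_min_mks (N : String) : Prop := N ≠ ""
instance (N : String) : Decidable (Pre_min_mks N) := by unfold Pre_min_mks; infer_instance
def pvWitness_min_mks : String := "MKKMM"

def Spec_min_mks (N : String) (out : Int) : Prop := out = min_mks_alt N
instance (N : String) (out : Int) : Decidable (Spec_min_mks N out) := by unfold Spec_min_mks; infer_instance

-- ===== CLAIM (what is proved, stated in full; the proofs are below) =====
def Claim_equal_min_mks : Prop := ∀ (N : String), Dom_min_mks N → Pre_min_mks N → Spec_min_mks N (min_mks N)

-- ===== LEMMAS AND PROOFS =====

-- the digit block a K emits after a run of m M's, and the trailing block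
def minMksBlockL (m : Nat) : List Char :=
  (if m = 0 then [] else '1' :: List.replicate (m - 1) '0') ++ ['5']
def minMksTailL (m : Nat) : List Char :=
  if m = 0 then [] else '1' :: List.replicate (m - 1) '0'

-- the whole digit string, from the list of run lengths
def minMksG : List Nat → List Char
  | [] => []
  | [m] => minMksTailL m
  | m :: n :: rest => minMksBlockL m ++ minMksG (n :: rest)

theorem minMksRun_eq_len (p : List Char) : minMksRun p = minMksTailL p.length := by
  cases p <;> simp [minMksRun, minMksTailL]

theorem minMksG_cons (m : Nat) (rest : List Nat) (h : rest ≠ []) :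
    minMksG (m :: rest) = minMksBlockL m ++ minMksG rest := by
  cases rest with
  | nil => exact absurd rfl h
  | cons n t => rfl

-- B's expression equals minMksG of the run lengths
theorem minMksB_eq_G (parts : List (List Char)) (h : parts ≠ []) :
    ((parts.dropLast.map (fun p => minMksRun p ++ ['5'])).flatten)
      ++ minMksRun (PySem.List.pyGetD parts (-1) [])
    = minMksG (parts.map List.length) := by
  induction parts with
  | nil => exact absurd rfl h
  | cons p rest ih =>
    cases rest with
    | nil =>
      rw [PySem.List.pyGetD_neg_one _ _ (by simp)]
      simp [minMksG, minMksRun_eq_len]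
    | cons q t =>
      have hne : (q :: t : List (List Char)) ≠ [] := by simp
      rw [PySem.List.pyGetD_neg_one _ _ (by simp), List.getLast_cons hne,
          ← PySem.List.pyGetD_neg_one _ [] hne]
      rw [show (p :: q :: t).dropLast = p :: (q :: t).dropLast from rfl]
      simp only [List.map_cons, List.flatten_cons, List.append_assoc]
      rw [ih hne]
      rw [minMksG_cons p.length (q.length :: List.map List.length t) (by simp),
          minMksRun_eq_len]
      simp only [minMksBlockL, List.append_assoc]
      simp [minMksTailL]

-- run lengths of splitOn, by the head character
theorem splitOn_len_K (t : List Char) :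
    (('K' :: t).splitOn 'K').map List.length = 0 :: (t.splitOn 'K').map List.length := by
  simp [List.splitOn, List.splitOnP_cons]

theorem splitOn_len_M (c : Char) (t : List Char) (hc : ¬ c = 'K') :
    ((c :: t).splitOn 'K').map List.length
      = (((t.splitOn 'K').map List.length).modifyHead (· + 1)) := by
  simp only [List.splitOn, List.splitOnP_cons, beq_iff_eq, hc, if_false]
  obtain ⟨r, rest, hr⟩ := List.exists_cons_of_ne_nil (List.splitOnP_ne_nil (· == 'K') t)
  rw [hr]
  simp

-- A's finalised loop, started with pending run m, appends minMksG of (m + first run) :: later runs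
theorem minMksA_loop (l : List Char) (num : List Char) (m : Nat) :
    minMksFin (l.foldl minMksStepA (num, (m : Int)))
    = num ++ minMksG (((l.splitOn 'K').map List.length).modifyHead (m + ·)) := by
  induction l generalizing num m with
  | nil =>
    simp only [List.foldl_nil, List.splitOn_nil, List.map_cons, List.map_nil,
      List.modifyHead_cons]
    by_cases hm : m = 0
    · subst hm; simp [minMksFin, minMksG, minMksTailL]
    · have h1 : ((m : Int)) ≠ 0 := by exact_mod_cast hm
      simp [minMksFin, hm, minMksG, minMksTailL, PySem.List.pyRepeat_singleton,
        show ((m : Int) - 1).toNat = m - 1 by omega]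
  | cons c t ih =>
    by_cases hc : c = 'K'
    · subst hc
      simp only [List.foldl_cons, minMksStepA, beq_self_eq_true, if_true]
      have hih := ih (num ++ PySem.List.pyRepeat ['1'] (if ((m:Int)) = 0 then 0 else 1)
          ++ PySem.List.pyRepeat ['0'] ((m:Int) - 1) ++ ['5']) 0
      simp only [Nat.cast_zero] at hih
      rw [hih, splitOn_len_K]
      simp only [List.modifyHead_cons]
      obtain ⟨r, rest, hr⟩ := List.exists_cons_of_ne_nil
        (show (t.splitOn 'K').map List.length ≠ [] by
          simp [List.splitOn, List.splitOnP_ne_nil])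
      rw [hr, minMksG_cons _ _ (by simp)]
      simp only [List.modifyHead_cons, Nat.zero_add]
      by_cases hm : m = 0
      · subst hm
        simp [minMksBlockL, PySem.List.pyRepeat_singleton]
      · have h1 : ((m : Int)) ≠ 0 := by exact_mod_cast hm
        simp [hm, minMksBlockL, PySem.List.pyRepeat_singleton,
          show ((m : Int) - 1).toNat = m - 1 by omega]
    · simp only [List.foldl_cons, minMksStepA, beq_iff_eq, hc, if_false]
      have hcast : ((m : Int) + 1) = ((m + 1 : Nat) : Int) := by push_cast; ring
      rw [hcast, ih, splitOn_len_M c t hc]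
      obtain ⟨r, rest, hr⟩ := List.exists_cons_of_ne_nil
        (show (t.splitOn 'K').map List.length ≠ [] by
          simp [List.splitOn, List.splitOnP_ne_nil])
      rw [hr]
      simp only [List.modifyHead_cons]
      have : m + 1 + r = m + (r + 1) := by omega
      rw [this]

-- ===== VERDICT (by name: the statement is the Claim_ definition above) =====
theorem min_mks_spec : Claim_equal_min_mks := by
  intro N _ _
  have hfold := PySem.List.foldl_pyRange_pyGetD N.toList ' ' minMksStepA
    ([], (0 : Int)) (le_refl (0 : Int))
  simp only [PySem.List.len_eq, Int.toNat_zero, List.drop_zero] at hfold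
  have hloop := minMksA_loop N.toList [] 0
  simp only [Nat.cast_zero, List.nil_append] at hloop
  simp only [Spec_min_mks, min_mks, min_mks_alt, PySem.Str.len_eq]
  rw [hfold, hloop, minMksB_eq_G _ (by simp [List.splitOn, List.splitOnP_ne_nil])]
  obtain ⟨r, rest, hr⟩ := List.exists_cons_of_ne_nil
    (show (N.toList.splitOn 'K').map List.length ≠ [] by
      simp [List.splitOn, List.splitOnP_ne_nil])
  rw [hr]
  simp
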